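-- pv_equiv track=rewrite | github.com/BenyKammoun/AccountBalance | solution.py | outcoms
-- ===== SOURCE A (Python) =====
-- def outcoms(T: list) -> dict:
--     '''Return outcoms per month.
--
--     T: list of tuples (date, transaction) representing a year of
--     bank transactions.
--     '''
--     B = {}
--     for trans in T:
--         entry = B.setdefault(trans[0][5:7], [])
--         amnt = trans[1]
--         if amnt < 0:
--             entry.append(amnt)
--     return B
-- ===== SOURCE B (Python) =====
-- def outcoms(T: list) -> dict:
--     '''Return outcoms per month.
--
--     T: list of tuples (date, transaction) representing a year of
--     bank transactions.
--     '''
--     months = dict.fromkeys(t[0][5:7] for t in T)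
--     return {m: [t[1] for t in T if t[0][5:7] == m and t[1] < 0] for m in months}
-- ===== Notes on version B (the rewrite author's own statement) =====
-- stated objective: alternative
-- what changed: Replaces the single interleaved setdefault/append pass with a two-phase strategy: first collect the distinct months in first-appearance order with dict.fromkeys, then build the result as a dict comprehension that re-scans T per month for its negative amounts.
import Mathlib
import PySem

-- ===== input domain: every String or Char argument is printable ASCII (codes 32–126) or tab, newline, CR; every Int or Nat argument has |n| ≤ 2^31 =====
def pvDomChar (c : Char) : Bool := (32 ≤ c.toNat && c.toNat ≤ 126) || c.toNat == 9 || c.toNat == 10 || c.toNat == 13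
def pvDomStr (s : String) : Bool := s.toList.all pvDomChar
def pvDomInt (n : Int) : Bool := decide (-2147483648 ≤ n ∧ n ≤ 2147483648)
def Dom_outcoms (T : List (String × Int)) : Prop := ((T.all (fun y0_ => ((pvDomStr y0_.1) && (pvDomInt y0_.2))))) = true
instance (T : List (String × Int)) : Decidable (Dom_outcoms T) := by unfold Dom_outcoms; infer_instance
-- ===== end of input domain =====

-- B replaces A's single setdefault/append pass by dict.fromkeys over the months plus a
-- per-month re-scan comprehension (an alternative decomposition, not claimed faster).

-- ===== PORT A =====
-- one pass: B.setdefault(trans[0][5:7], []) then append trans[1] if negative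
def outcoms (T : List (String × Int)) : List (String × List Int) :=
  (T.foldl (fun B trans =>
      let m := PySem.Str.slice trans.1 (some 5) (some 7)
      let B' := B.setdefault m ([] : List Int)
      let amnt := trans.2
      if amnt < 0 then B'.modify m [] (fun l => l ++ [amnt]) else B')
    PySem.Dict.empty).items

-- ===== PORT B =====
-- months = dict.fromkeys(t[0][5:7] for t in T); then a per-month comprehension of negatives
def outcoms_alt (T : List (String × Int)) : List (String × List Int) :=
  let months := PySem.List.dedup (T.map (fun t => PySem.Str.slice t.1 (some 5) (some 7)))
  months.map (fun m =>
    (m, (T.filter (fun t => PySem.Str.slice t.1 (some 5) (some 7) == m && decide (t.2 < 0))).map (fun t => t.2)))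

-- ===== PRECONDITION & SPEC =====
def Spec_outcoms (T : List (String × Int)) (out : List (String × List Int)) : Prop := out = outcoms_alt T
instance (T : List (String × Int)) (out : List (String × List Int)) : Decidable (Spec_outcoms T out) := by unfold Spec_outcoms; infer_instance

-- ===== CLAIM (what is proved, stated in full; the proofs are below) =====
def Claim_equal_outcoms : Prop := ∀ (T : List (String × Int)), Dom_outcoms T → Spec_outcoms T (outcoms T)

-- ===== LEMMAS AND PROOFS =====

-- A's loop body, named for the lemmas below
def pvStepA (B : PySem.Dict String (List Int)) (trans : String × Int) : PySem.Dict String (List Int) :=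
  let m := PySem.Str.slice trans.1 (some 5) (some 7)
  let B' := B.setdefault m ([] : List Int)
  let amnt := trans.2
  if amnt < 0 then B'.modify m [] (fun l => l ++ [amnt]) else B'

theorem pvKeys_stepA (d : PySem.Dict String (List Int)) (t : String × Int) :
    (pvStepA d t).keys = PySem.Set.add d.keys (PySem.Str.slice t.1 (some 5) (some 7)) := by
  simp only [pvStepA]
  by_cases hc : d.contains (PySem.Str.slice t.1 (some 5) (some 7)) = true
  · have hmem := (PySem.Dict.contains_iff_mem_keys d _).mp hc
    rw [PySem.Set.add_of_mem hmem]
    simp only [PySem.Dict.setdefault_of_contains d _ hc]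
    split
    · rw [PySem.Dict.keys_modify, PySem.Dict.keys_insert_of_contains _ _ hc]
    · rfl
  · have hc' : d.contains (PySem.Str.slice t.1 (some 5) (some 7)) = false := by
      simpa using hc
    have hmem : PySem.Str.slice t.1 (some 5) (some 7) ∉ d.keys := by
      intro h; exact hc ((PySem.Dict.contains_iff_mem_keys d _).mpr h)
    rw [PySem.Set.add_of_not_mem hmem]
    rw [PySem.Dict.setdefault_of_not_contains d _ hc']
    split
    · rw [PySem.Dict.keys_modify,
        PySem.Dict.keys_insert_of_contains _ _ (PySem.Dict.contains_insert_self d _ _),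
        PySem.Dict.keys_insert_of_not_contains d _ hc']
    · rw [PySem.Dict.keys_insert_of_not_contains d _ hc']

theorem pvKeys_fold (T : List (String × Int)) (d : PySem.Dict String (List Int)) :
    (T.foldl pvStepA d).keys
      = PySem.Set.update d.keys (T.map (fun t => PySem.Str.slice t.1 (some 5) (some 7))) := by
  induction T generalizing d with
  | nil => simp [PySem.Set.update_nil]
  | cons t r ih =>
    simp only [List.foldl_cons, List.map_cons, PySem.Set.update_cons]
    rw [ih, pvKeys_stepA]

theorem pvGetD_stepA (d : PySem.Dict String (List Int)) (t : String × Int) (m : String) :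
    (pvStepA d t).getD m [] =
      d.getD m [] ++ (if PySem.Str.slice t.1 (some 5) (some 7) == m && decide (t.2 < 0) then [t.2] else []) := by
  simp only [pvStepA]
  by_cases hc : d.contains (PySem.Str.slice t.1 (some 5) (some 7)) = true
  · simp only [PySem.Dict.setdefault_of_contains d _ hc]
    by_cases hneg : t.2 < 0
    · simp only [if_pos hneg, PySem.Dict.modify, PySem.Dict.getD_insert]
      by_cases hm : m = PySem.Str.slice t.1 (some 5) (some 7)
      · simp [hm, hneg]
      · simp [hm, Ne.symm hm, beq_iff_eq]
    · simp only [if_neg hneg]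
      by_cases hm : PySem.Str.slice t.1 (some 5) (some 7) = m <;> simp [hm, hneg]
  · have hc' : d.contains (PySem.Str.slice t.1 (some 5) (some 7)) = false := by simpa using hc
    have hd0 : d.getD (PySem.Str.slice t.1 (some 5) (some 7)) ([] : List Int) = [] :=
      PySem.Dict.getD_of_not_contains d _ hc'
    rw [PySem.Dict.setdefault_of_not_contains d _ hc']
    by_cases hneg : t.2 < 0
    · simp only [if_pos hneg, PySem.Dict.modify, PySem.Dict.getD_insert]
      by_cases hm : m = PySem.Str.slice t.1 (some 5) (some 7)
      · simp [hm, hneg, hd0]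
      · simp [hm, Ne.symm hm, beq_iff_eq]
    · simp only [if_neg hneg, PySem.Dict.getD_insert]
      by_cases hm : m = PySem.Str.slice t.1 (some 5) (some 7)
      · simp [hm, hneg, hd0]
      · simp [hm, Ne.symm hm, beq_iff_eq]

theorem pvGetD_fold (T : List (String × Int)) (d : PySem.Dict String (List Int)) (m : String) :
    (T.foldl pvStepA d).getD m []
      = d.getD m [] ++ (T.filter (fun t => PySem.Str.slice t.1 (some 5) (some 7) == m && decide (t.2 < 0))).map (fun t => t.2) := by
  induction T generalizing d with
  | nil => simp
  | cons t r ih =>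
    simp only [List.foldl_cons, List.filter_cons]
    rw [ih, pvGetD_stepA]
    by_cases h : (PySem.Str.slice t.1 (some 5) (some 7) == m && decide (t.2 < 0)) = true <;>
      simp [h]

-- ===== VERDICT (by name: the statement is the Claim_ definition above) =====
theorem outcoms_spec : Claim_equal_outcoms := by
  intro T _
  unfold Spec_outcoms outcoms outcoms_alt
  have hfold : ∀ (d : PySem.Dict String (List Int)) (trans : String × Int),
      (fun B trans =>
        let m := PySem.Str.slice trans.1 (some 5) (some 7)
        let B' := PySem.Dict.setdefault B m ([] : List Int)
        let amnt := trans.2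
        if amnt < 0 then B'.modify m [] (fun l => l ++ [amnt]) else B') d trans = pvStepA d trans := by
    intro d trans; rfl
  simp only [hfold]
  have hkeys : (T.foldl pvStepA PySem.Dict.empty).keys
      = PySem.Set.ofList (T.map (fun t => PySem.Str.slice t.1 (some 5) (some 7))) := by
    rw [pvKeys_fold, PySem.Dict.keys_empty, PySem.Set.update_nil_left]
  have hnodup : (T.foldl pvStepA PySem.Dict.empty).keys.Nodup := by
    rw [hkeys]; exact PySem.Set.nodup_ofList _
  rw [PySem.Dict.items_eq_map_keys _ hnodup ([] : List Int), hkeys,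
    PySem.List.dedup_eq_ofList]
  apply List.map_congr_left
  intro m _
  rw [pvGetD_fold, PySem.Dict.getD_empty]
  simp
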